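-- pv_equiv track=rewrite | github.com/whitel15/Algorithm | Python/Programmers/Lv_2/숫자 카드 나누기.py | solution
-- ===== SOURCE A (Python) =====
-- def solution(arrayA, arrayB):
--     a = arrayA[0]
--     b = arrayB[0]
--
--     for i in arrayA[1:]:
--         a = gcd(i, a)
--
--     for i in arrayB[1:]:
--         b = gcd(i, b)
--
--     return max(find(arrayB, a), find(arrayA, b))
--
-- def gcd(a, b):
--     if a % b == 0:
--         return b
--     return gcd(b, a % b)
--
-- def find(arr, num):
--     for i in range(len(arr)):
--         if arr[i] % num == 0:
--             return 0
--     return num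
-- ===== SOURCE B (Python) =====
-- def gcd(a, b):
--     while b:
--         a, b = b, a % b
--     return a
--
-- def gcd_of(arr):
--     g = arr[0]
--     for x in arr[1:]:
--         g = gcd(x, g)
--     return g
--
-- def solution(arrayA, arrayB):
--     ga = gcd_of(arrayA)
--     gb = gcd_of(arrayB)
--     ra = ga if all(x % ga for x in arrayB) else 0
--     rb = gb if all(x % gb for x in arrayA) else 0
--     return max(ra, rb)
-- ===== Notes on version B (the rewrite author's own statement) =====
-- stated objective: alternative
-- what changed: Replaces the recursive Euclid helper and the index-loop find with an iterative while-b Euclid folded over each list by a gcd_of helper and all() divisibility tests; Pre_ excludes empty lists and lists whose first element is 0, where A raises (IndexError / ZeroDivisionError).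
import Mathlib
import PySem

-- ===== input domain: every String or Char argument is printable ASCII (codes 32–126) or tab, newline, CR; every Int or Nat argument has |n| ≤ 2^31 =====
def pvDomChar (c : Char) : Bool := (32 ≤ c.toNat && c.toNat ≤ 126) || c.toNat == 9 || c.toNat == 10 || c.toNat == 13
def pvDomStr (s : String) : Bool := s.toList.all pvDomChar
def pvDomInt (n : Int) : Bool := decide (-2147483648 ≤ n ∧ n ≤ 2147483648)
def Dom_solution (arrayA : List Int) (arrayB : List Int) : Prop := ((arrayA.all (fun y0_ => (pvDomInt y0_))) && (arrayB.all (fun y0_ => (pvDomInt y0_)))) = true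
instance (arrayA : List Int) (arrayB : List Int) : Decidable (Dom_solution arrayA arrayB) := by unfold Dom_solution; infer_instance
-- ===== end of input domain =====

-- B replaces A's recursive Euclid helper and index-loop `find` with an iterative
-- while-b Euclid folded over each list and all() divisibility tests (alternative decomposition).

-- ===== PORT A =====
-- A's recursive gcd on Int (Python floor mod); b = 0 is a ZeroDivisionError in
-- Python, excluded by Pre_solution (the 0 returned there is never reached under Pre_).
def pygcd (a b : Int) : Int :=
  if hb : b = 0 then 0
  else if PySem.Int.mod a b = 0 then b
  else pygcd b (PySem.Int.mod a b)
termination_by b.natAbs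
decreasing_by
  rcases lt_trichotomy b 0 with h | h | h
  · have h1 := PySem.Int.mod_neg_bounds a h
    omega
  · exact absurd h hb
  · have h1 := PySem.Int.mod_nonneg a h
    have h2 := PySem.Int.mod_lt a h
    omega

-- A's find: first divisible element gives 0, else num
def pyfind (arr : List Int) (num : Int) : Int :=
  match arr with
  | [] => num
  | x :: xs => if PySem.Int.mod x num = 0 then 0 else pyfind xs num

def solution (arrayA : List Int) (arrayB : List Int) : Int :=
  match arrayA, arrayB with
  | a0 :: as_, b0 :: bs_ =>
    let a := as_.foldl (fun acc i => pygcd i acc) a0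
    let b := bs_.foldl (fun acc i => pygcd i acc) b0
    max (pyfind (b0 :: bs_) a) (pyfind (a0 :: as_) b)
  | _, _ => 0  -- Python raises IndexError on an empty list; excluded by Pre_solution

-- ===== PORT B =====
-- Source B's iterative Euclid: while b: a, b = b, a % b; return a
def gcdWhile (a b : Int) : Int :=
  if hb : b = 0 then a else gcdWhile b (PySem.Int.mod a b)
termination_by b.natAbs
decreasing_by
  rcases lt_trichotomy b 0 with h | h | h
  · have h1 := PySem.Int.mod_neg_bounds a h
    omega
  · exact absurd h hb
  · have h1 := PySem.Int.mod_nonneg a h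
    have h2 := PySem.Int.mod_lt a h
    omega

-- Source B's gcd_of: fold gcd over the tail starting from the head
def gcdOf (arr : List Int) : Int :=
  match arr with
  | [] => 0  -- Source B raises IndexError here; excluded by Pre_solution
  | g0 :: xs => xs.foldl (fun g x => gcdWhile x g) g0

def solution_alt (arrayA : List Int) (arrayB : List Int) : Int :=
  let ga := gcdOf arrayA
  let gb := gcdOf arrayB
  let ra := if arrayB.all (fun x => PySem.Int.mod x ga != 0) then ga else 0
  let rb := if arrayA.all (fun x => PySem.Int.mod x gb != 0) then gb else 0
  max ra rb

-- ===== PRECONDITION & SPEC =====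
-- Pre_ excludes exactly the inputs where Python A raises: an empty list (IndexError)
-- or a list whose FIRST element is 0 (the gcd accumulator keeps a nonzero value
-- whenever the head is nonzero, so a ZeroDivisionError occurs iff a head is 0).
def Pre_solution (arrayA : List Int) (arrayB : List Int) : Prop :=
  arrayA ≠ [] ∧ arrayB ≠ [] ∧ arrayA.headD 0 ≠ 0 ∧ arrayB.headD 0 ≠ 0
instance (arrayA : List Int) (arrayB : List Int) : Decidable (Pre_solution arrayA arrayB) := by unfold Pre_solution; infer_instance

def pvWitness_solution : List Int × List Int := ([6, 4], [9, 3])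

def Spec_solution (arrayA : List Int) (arrayB : List Int) (out : Int) : Prop := out = solution_alt arrayA arrayB
instance (arrayA : List Int) (arrayB : List Int) (out : Int) : Decidable (Spec_solution arrayA arrayB out) := by unfold Spec_solution; infer_instance

-- ===== CLAIM (what is proved, stated in full; the proofs are below) =====
def Claim_equal_solution : Prop := ∀ (arrayA : List Int) (arrayB : List Int), Dom_solution arrayA arrayB → Pre_solution arrayA arrayB → Spec_solution arrayA arrayB (solution arrayA arrayB)

-- ===== LEMMAS AND PROOFS =====

-- A's recursive gcd never returns 0 when the divisor is nonzero
theorem pygcd_ne_zero : ∀ (n : Nat) (a b : Int), b.natAbs = n → b ≠ 0 → pygcd a b ≠ 0 := by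
  intro n
  induction n using Nat.strong_induction_on with
  | _ n ih =>
    intro a b hn hb
    rw [pygcd, dif_neg hb]
    by_cases hm : PySem.Int.mod a b = 0
    · rw [if_pos hm]; exact hb
    · rw [if_neg hm]
      have hlt : (PySem.Int.mod a b).natAbs < b.natAbs := by
        rcases lt_trichotomy b 0 with h | h | h
        · have h1 := PySem.Int.mod_neg_bounds a h
          omega
        · exact absurd h hb
        · have h1 := PySem.Int.mod_nonneg a h
          have h2 := PySem.Int.mod_lt a h
          omega
      exact ih _ (hn ▸ hlt) b _ rfl hm

-- A's recursive gcd coincides with B's iterative while-b gcd for nonzero divisor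
theorem pygcd_eq_gcdWhile : ∀ (n : Nat) (a b : Int), b.natAbs = n → b ≠ 0 →
    pygcd a b = gcdWhile a b := by
  intro n
  induction n using Nat.strong_induction_on with
  | _ n ih =>
    intro a b hn hb
    rw [pygcd, dif_neg hb, gcdWhile, dif_neg hb]
    by_cases hm : PySem.Int.mod a b = 0
    · rw [if_pos hm, hm, gcdWhile]
      simp
    · rw [if_neg hm]
      have hlt : (PySem.Int.mod a b).natAbs < b.natAbs := by
        rcases lt_trichotomy b 0 with h | h | h
        · have h1 := PySem.Int.mod_neg_bounds a h
          omega
        · exact absurd h hb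
        · have h1 := PySem.Int.mod_nonneg a h
          have h2 := PySem.Int.mod_lt a h
          omega
      exact ih _ (hn ▸ hlt) b _ rfl hm

-- the two gcd folds agree when the accumulator starts nonzero
theorem fold_gcd_eq (xs : List Int) (g0 : Int) (h0 : g0 ≠ 0) :
    xs.foldl (fun acc i => pygcd i acc) g0 = xs.foldl (fun g x => gcdWhile x g) g0 := by
  induction xs generalizing g0 with
  | nil => rfl
  | cons x xs ih =>
    simp only [List.foldl]
    rw [pygcd_eq_gcdWhile g0.natAbs x g0 rfl h0] at *
    have hne : gcdWhile x g0 ≠ 0 := by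
      rw [← pygcd_eq_gcdWhile g0.natAbs x g0 rfl h0]
      exact pygcd_ne_zero g0.natAbs x g0 rfl h0
    exact ih _ hne

-- A's find equals B's all() test
theorem pyfind_eq_all (arr : List Int) (num : Int) :
    pyfind arr num = if arr.all (fun x => PySem.Int.mod x num != 0) then num else 0 := by
  induction arr with
  | nil => simp [pyfind]
  | cons x xs ih =>
    simp only [pyfind, List.all_cons, Bool.and_eq_true, bne_iff_ne, ne_eq]
    by_cases hx : PySem.Int.mod x num = 0
    · simp [hx]
    · simp only [if_neg hx, ih]
      by_cases hall : xs.all (fun x => PySem.Int.mod x num != 0) = true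
      · simp [hx, hall]
      · simp [hx, hall]

-- ===== VERDICT (by name: the statements are the Claim_ definitions above) =====
theorem solution_spec : Claim_equal_solution := by
  intro arrayA arrayB _ hpre
  obtain ⟨hA, hB, hA0, hB0⟩ := hpre
  unfold Spec_solution solution_alt
  match arrayA, arrayB with
  | [], _ => exact absurd rfl hA
  | _, [] => exact absurd rfl hB
  | a0 :: as_, b0 :: bs_ =>
    have ha0 : a0 ≠ 0 := by simpa using hA0
    have hb0 : b0 ≠ 0 := by simpa using hB0
    show max _ _ = max _ _
    rw [fold_gcd_eq as_ a0 ha0, fold_gcd_eq bs_ b0 hb0, pyfind_eq_all, pyfind_eq_all]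
    rfl
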